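-- pv_equiv track=rewrite | github.com/tiasturias/Research_LeyIA_DataScience | Research_AI_law/FASE3/src/fase3_pipeline/transform.py | _block_for
-- ===== SOURCE A (Python) =====
-- def _block_for(source_id: str, variable: str, table_id: str) -> str:
--     text = f"{variable} {table_id}".lower()
--     if source_id == "iapp":
--         return "regulatory_treatment"
--     if source_id == "microsoft":
--         return "adoption_diffusion"
--     if source_id == "oxford":
--         return "ecosystem_outcome"
--     if source_id == "wipo":
--         if any(k in text for k in ["out_", "brand", "crea", "pat", "scite", "gii_score", "wikiedit", "industdes", "utilmod"]):
--             return "ecosystem_outcome"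
--         if any(k in text for k in ["goveff", "regqua", "ruleol", "polstab", "ease", "credit", "market"]):
--             return "institutional_control"
--         if any(k in text for k in ["tertenrol", "scienggrad", "pisa", "expedu", "rdexp", "research"]):
--             return "socioeconomic_control"
--         return "tech_infrastructure_control"
--     if source_id == "anthropic":
--         return "socioeconomic_control" if "gdp" in text else "adoption_diffusion"
--     if source_id == "stanford":
--         return "regulatory_treatment" if "fig_3" in text else "ecosystem_outcome"
--     if source_id == "oecd":
--         if any(k in text for k in ["digital_stri", "regulatory_gov", "fdi_restrictiveness", "pmr"]):
--             return "institutional_control"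
--         if any(k in text for k in ["ict_business"]):
--             return "adoption_diffusion"
--         if any(k in text for k in ["gbard", "rd_tax"]):
--             return "socioeconomic_control"
--         return "tech_infrastructure_control"
--     if source_id == "wb":
--         if any(k in text for k in ["corruption", "effectiveness", "stability", "regulatory", "rule_of_law", "voice"]):
--             return "institutional_control"
--         if any(k in text for k in ["internet", "broadband", "electric", "patent"]):
--             return "tech_infrastructure_control"
--         return "socioeconomic_control"
--     return "socioeconomic_control"
-- ===== SOURCE B (Python) =====
-- _CONST = {
--     "iapp": "regulatory_treatment",
--     "microsoft": "adoption_diffusion",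
--     "oxford": "ecosystem_outcome",
-- }
--
-- # Per source: ordered label array (last entry = default) and a flat keyword -> rank map.
-- _LABELS = {
--     "wipo": ["ecosystem_outcome", "institutional_control", "socioeconomic_control", "tech_infrastructure_control"],
--     "anthropic": ["socioeconomic_control", "adoption_diffusion"],
--     "stanford": ["regulatory_treatment", "ecosystem_outcome"],
--     "oecd": ["institutional_control", "adoption_diffusion", "socioeconomic_control", "tech_infrastructure_control"],
--     "wb": ["institutional_control", "tech_infrastructure_control", "socioeconomic_control"],
-- }
--
-- _RANK = {
--     "wipo": {"out_": 0, "brand": 0, "crea": 0, "pat": 0, "scite": 0, "gii_score": 0,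
--              "wikiedit": 0, "industdes": 0, "utilmod": 0,
--              "goveff": 1, "regqua": 1, "ruleol": 1, "polstab": 1, "ease": 1, "credit": 1, "market": 1,
--              "tertenrol": 2, "scienggrad": 2, "pisa": 2, "expedu": 2, "rdexp": 2, "research": 2},
--     "anthropic": {"gdp": 0},
--     "stanford": {"fig_3": 0},
--     "oecd": {"digital_stri": 0, "regulatory_gov": 0, "fdi_restrictiveness": 0, "pmr": 0,
--              "ict_business": 1, "gbard": 2, "rd_tax": 2},
--     "wb": {"corruption": 0, "effectiveness": 0, "stability": 0, "regulatory": 0,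
--            "rule_of_law": 0, "voice": 0,
--            "internet": 1, "broadband": 1, "electric": 1, "patent": 1},
-- }
--
--
-- def _block_for(source_id: str, variable: str, table_id: str) -> str:
--     if source_id in _CONST:
--         return _CONST[source_id]
--     if source_id not in _RANK:
--         return "socioeconomic_control"
--     text = f"{variable} {table_id}".lower()
--     labels = _LABELS[source_id]
--     best = len(labels) - 1
--     for k, r in _RANK[source_id].items():
--         if k in text and r < best:
--             best = r
--     return labels[best]
-- ===== Notes on version B (the rewrite author's own statement) =====
-- stated objective: alternative
-- what changed: Replaced the ordered if/elif keyword-group dispatch with a flat keyword-to-rank map per source and a single min-rank accumulator pass, the result being an index into a per-source label array whose last entry is the default.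
import Mathlib
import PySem

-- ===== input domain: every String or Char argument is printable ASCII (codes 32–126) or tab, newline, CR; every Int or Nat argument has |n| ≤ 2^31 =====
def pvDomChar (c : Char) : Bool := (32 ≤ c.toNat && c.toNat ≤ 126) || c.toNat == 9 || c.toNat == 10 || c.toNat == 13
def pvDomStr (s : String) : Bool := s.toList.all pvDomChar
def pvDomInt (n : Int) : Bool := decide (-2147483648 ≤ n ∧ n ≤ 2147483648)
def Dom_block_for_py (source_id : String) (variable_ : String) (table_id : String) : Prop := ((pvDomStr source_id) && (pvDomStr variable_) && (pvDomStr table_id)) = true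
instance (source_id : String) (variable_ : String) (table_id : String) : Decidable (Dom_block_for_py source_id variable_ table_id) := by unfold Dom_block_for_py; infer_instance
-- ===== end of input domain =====

-- B replaces A's ordered if/elif keyword-group dispatch by a flat keyword->rank map per source,
-- a single min-rank accumulator pass over it, and an index into a per-source label array
-- whose last entry is the default (objective: alternative; same cost).


-- ===== PORT A =====
def block_for_py (source_id : String) (variable_ : String) (table_id : String) : String :=
  let text := PySem.Str.lower (variable_ ++ " " ++ table_id)
  if source_id = "iapp" then "regulatory_treatment"
  else if source_id = "microsoft" then "adoption_diffusion"
  else if source_id = "oxford" then "ecosystem_outcome"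
  else if source_id = "wipo" then
    if (["out_", "brand", "crea", "pat", "scite", "gii_score", "wikiedit", "industdes", "utilmod"] : List String).any (fun k => PySem.Str.isIn k text) then "ecosystem_outcome"
    else if (["goveff", "regqua", "ruleol", "polstab", "ease", "credit", "market"] : List String).any (fun k => PySem.Str.isIn k text) then "institutional_control"
    else if (["tertenrol", "scienggrad", "pisa", "expedu", "rdexp", "research"] : List String).any (fun k => PySem.Str.isIn k text) then "socioeconomic_control"
    else "tech_infrastructure_control"
  else if source_id = "anthropic" then
    if PySem.Str.isIn "gdp" text then "socioeconomic_control" else "adoption_diffusion"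
  else if source_id = "stanford" then
    if PySem.Str.isIn "fig_3" text then "regulatory_treatment" else "ecosystem_outcome"
  else if source_id = "oecd" then
    if (["digital_stri", "regulatory_gov", "fdi_restrictiveness", "pmr"] : List String).any (fun k => PySem.Str.isIn k text) then "institutional_control"
    else if (["ict_business"] : List String).any (fun k => PySem.Str.isIn k text) then "adoption_diffusion"
    else if (["gbard", "rd_tax"] : List String).any (fun k => PySem.Str.isIn k text) then "socioeconomic_control"
    else "tech_infrastructure_control"
  else if source_id = "wb" then
    if (["corruption", "effectiveness", "stability", "regulatory", "rule_of_law", "voice"] : List String).any (fun k => PySem.Str.isIn k text) then "institutional_control"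
    else if (["internet", "broadband", "electric", "patent"] : List String).any (fun k => PySem.Str.isIn k text) then "tech_infrastructure_control"
    else "socioeconomic_control"
  else "socioeconomic_control"

-- ===== PORT B =====
def pvConst : PySem.Dict String String := PySem.Dict.ofList
  [("iapp", "regulatory_treatment"),
   ("microsoft", "adoption_diffusion"),
   ("oxford", "ecosystem_outcome")]

def pvLabels : PySem.Dict String (List String) := PySem.Dict.ofList
  [("wipo", ["ecosystem_outcome", "institutional_control", "socioeconomic_control", "tech_infrastructure_control"]),
   ("anthropic", ["socioeconomic_control", "adoption_diffusion"]),
   ("stanford", ["regulatory_treatment", "ecosystem_outcome"]),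
   ("oecd", ["institutional_control", "adoption_diffusion", "socioeconomic_control", "tech_infrastructure_control"]),
   ("wb", ["institutional_control", "tech_infrastructure_control", "socioeconomic_control"])]

def pvRank : PySem.Dict String (List (String × Nat)) := PySem.Dict.ofList
  [("wipo", [("out_", 0), ("brand", 0), ("crea", 0), ("pat", 0), ("scite", 0), ("gii_score", 0),
             ("wikiedit", 0), ("industdes", 0), ("utilmod", 0),
             ("goveff", 1), ("regqua", 1), ("ruleol", 1), ("polstab", 1), ("ease", 1), ("credit", 1), ("market", 1),
             ("tertenrol", 2), ("scienggrad", 2), ("pisa", 2), ("expedu", 2), ("rdexp", 2), ("research", 2)]),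
   ("anthropic", [("gdp", 0)]),
   ("stanford", [("fig_3", 0)]),
   ("oecd", [("digital_stri", 0), ("regulatory_gov", 0), ("fdi_restrictiveness", 0), ("pmr", 0),
             ("ict_business", 1), ("gbard", 2), ("rd_tax", 2)]),
   ("wb", [("corruption", 0), ("effectiveness", 0), ("stability", 0), ("regulatory", 0),
           ("rule_of_law", 0), ("voice", 0),
           ("internet", 1), ("broadband", 1), ("electric", 1), ("patent", 1)])]

def block_for_py_alt (source_id : String) (variable_ : String) (table_id : String) : String :=
  match pvConst.get? source_id with
  | some lbl => lbl
  | none =>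
    match pvRank.get? source_id with
    | none => "socioeconomic_control"
    | some pairs =>
      let text := PySem.Str.lower (variable_ ++ " " ++ table_id)
      let labels := pvLabels.getD source_id []
      let best := pairs.foldl
        (fun (m : Nat) (p : String × Nat) => if PySem.Str.isIn p.1 text ∧ p.2 < m then p.2 else m)
        (labels.length - 1)
      -- labels[best]: best is always in range here, so plain list indexing with a default is exact
      labels.getD best "socioeconomic_control"

-- ===== PRECONDITION & SPEC =====
def Spec_block_for_py (source_id : String) (variable_ : String) (table_id : String) (out : String) : Prop := out = block_for_py_alt source_id variable_ table_id
instance (source_id : String) (variable_ : String) (table_id : String) (out : String) : Decidable (Spec_block_for_py source_id variable_ table_id out) := by unfold Spec_block_for_py; infer_instance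

-- ===== CLAIM (what is proved, stated in full; the proofs are below) =====
def Claim_equal_block_for_py : Prop := ∀ (source_id : String) (variable_ : String) (table_id : String), Dom_block_for_py source_id variable_ table_id → Spec_block_for_py source_id variable_ table_id (block_for_py source_id variable_ table_id)

-- ===== LEMMAS AND PROOFS =====

-- the min-rank accumulator over a uniform-rank keyword group
lemma pvFoldGroup (text : String) (r : Nat) (ks : List String) (m : Nat) :
    ((ks.map (fun k => (k, r))).foldl
      (fun (m : Nat) (p : String × Nat) => if PySem.Str.isIn p.1 text ∧ p.2 < m then p.2 else m) m)
    = if (ks.any fun k => PySem.Str.isIn k text) ∧ r < m then r else m := by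
  induction ks generalizing m with
  | nil => simp
  | cons k ks ih =>
    simp only [List.map_cons, List.foldl_cons, List.any_cons]
    by_cases hk : PySem.Str.isIn k text = true
    · by_cases hr : r < m
      · rw [if_pos ⟨hk, hr⟩, ih, if_neg (fun h => lt_irrefl r h.2),
          if_pos ⟨by rw [hk, Bool.true_or], hr⟩]
      · rw [if_neg (fun h => hr h.2), ih, if_neg (fun h => hr h.2), if_neg (fun h => hr h.2)]
    · simp only [Bool.not_eq_true] at hk
      rw [if_neg (fun h => by rw [hk] at h; exact Bool.false_ne_true h.1), ih]
      simp only [hk, Bool.false_or]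

lemma pvConst_other (s : String) (h1 : s ≠ "iapp") (h2 : s ≠ "microsoft") (h3 : s ≠ "oxford") :
    pvConst.get? s = none := by
  simp [pvConst, PySem.Dict.ofList, PySem.Dict.update, PySem.Dict.insert,
    PySem.Dict.contains, PySem.Dict.empty, PySem.Dict.get?,
    beq_eq_false_iff_ne.mpr (Ne.symm h1), beq_eq_false_iff_ne.mpr (Ne.symm h2),
    beq_eq_false_iff_ne.mpr (Ne.symm h3)]

lemma pvRank_other (s : String) (h4 : s ≠ "wipo") (h5 : s ≠ "anthropic") (h6 : s ≠ "stanford")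
    (h7 : s ≠ "oecd") (h8 : s ≠ "wb") :
    pvRank.get? s = none := by
  simp [pvRank, PySem.Dict.ofList, PySem.Dict.update, PySem.Dict.insert,
    PySem.Dict.contains, PySem.Dict.empty, PySem.Dict.get?,
    beq_eq_false_iff_ne.mpr (Ne.symm h4), beq_eq_false_iff_ne.mpr (Ne.symm h5),
    beq_eq_false_iff_ne.mpr (Ne.symm h6), beq_eq_false_iff_ne.mpr (Ne.symm h7),
    beq_eq_false_iff_ne.mpr (Ne.symm h8)]


def pvW0 : List String := ["out_", "brand", "crea", "pat", "scite", "gii_score", "wikiedit", "industdes", "utilmod"]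
def pvW1 : List String := ["goveff", "regqua", "ruleol", "polstab", "ease", "credit", "market"]
def pvW2 : List String := ["tertenrol", "scienggrad", "pisa", "expedu", "rdexp", "research"]
def pvO0 : List String := ["digital_stri", "regulatory_gov", "fdi_restrictiveness", "pmr"]
def pvO1 : List String := ["ict_business"]
def pvO2 : List String := ["gbard", "rd_tax"]
def pvB0 : List String := ["corruption", "effectiveness", "stability", "regulatory", "rule_of_law", "voice"]
def pvB1 : List String := ["internet", "broadband", "electric", "patent"]

-- ===== VERDICT (by name: the statement is the Claim_ definition above) =====
theorem block_for_py_spec : Claim_equal_block_for_py := by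
  intro s v t _
  unfold Spec_block_for_py
  by_cases h1 : s = "iapp"
  · subst h1
    have hc : pvConst.get? "iapp" = some "regulatory_treatment" := by decide
    simp [block_for_py, block_for_py_alt, hc]
  by_cases h2 : s = "microsoft"
  · subst h2
    have hc : pvConst.get? "microsoft" = some "adoption_diffusion" := by decide
    simp [block_for_py, block_for_py_alt, hc]
  by_cases h3 : s = "oxford"
  · subst h3
    have hc : pvConst.get? "oxford" = some "ecosystem_outcome" := by decide
    simp [block_for_py, block_for_py_alt, hc]
  by_cases h4 : s = "wipo"
  · subst h4
    have hc : pvConst.get? "wipo" = none := by decide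
    have hr : pvRank.get? "wipo"
        = some (pvW0.map (fun k => (k, 0)) ++ pvW1.map (fun k => (k, 1)) ++ pvW2.map (fun k => (k, 2))) := by decide
    have hl : pvLabels.getD "wipo" []
        = ["ecosystem_outcome", "institutional_control", "socioeconomic_control", "tech_infrastructure_control"] := by decide
    simp only [block_for_py, block_for_py_alt, hc, hr, hl, List.foldl_append, pvFoldGroup,
      String.reduceEq, reduceIte, List.length_cons, List.length_nil]
    by_cases a0 : (pvW0.any fun k => PySem.Str.isIn k (PySem.Str.lower (v ++ " " ++ t))) = true
    · simp_all [pvW0, pvW1, pvW2]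
    · by_cases a1 : (pvW1.any fun k => PySem.Str.isIn k (PySem.Str.lower (v ++ " " ++ t))) = true
      · simp_all [pvW0, pvW1, pvW2]
      · by_cases a2 : (pvW2.any fun k => PySem.Str.isIn k (PySem.Str.lower (v ++ " " ++ t))) = true
        · simp_all [pvW0, pvW1, pvW2]
        · simp_all [pvW0, pvW1, pvW2]
  by_cases h5 : s = "anthropic"
  · subst h5
    have hc : pvConst.get? "anthropic" = none := by decide
    have hr : pvRank.get? "anthropic" = some ((["gdp"] : List String).map (fun k => (k, 0))) := by decide
    have hl : pvLabels.getD "anthropic" [] = ["socioeconomic_control", "adoption_diffusion"] := by decide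
    simp only [block_for_py, block_for_py_alt, hc, hr, hl, pvFoldGroup,
      String.reduceEq, reduceIte, List.length_cons, List.length_nil]
    by_cases a0 : PySem.Str.isIn "gdp" (PySem.Str.lower (v ++ " " ++ t)) = true
    · simp_all
    · simp_all
  by_cases h6 : s = "stanford"
  · subst h6
    have hc : pvConst.get? "stanford" = none := by decide
    have hr : pvRank.get? "stanford" = some ((["fig_3"] : List String).map (fun k => (k, 0))) := by decide
    have hl : pvLabels.getD "stanford" [] = ["regulatory_treatment", "ecosystem_outcome"] := by decide
    simp only [block_for_py, block_for_py_alt, hc, hr, hl, pvFoldGroup,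
      String.reduceEq, reduceIte, List.length_cons, List.length_nil]
    by_cases a0 : PySem.Str.isIn "fig_3" (PySem.Str.lower (v ++ " " ++ t)) = true
    · simp_all
    · simp_all
  by_cases h7 : s = "oecd"
  · subst h7
    have hc : pvConst.get? "oecd" = none := by decide
    have hr : pvRank.get? "oecd"
        = some (pvO0.map (fun k => (k, 0)) ++ pvO1.map (fun k => (k, 1)) ++ pvO2.map (fun k => (k, 2))) := by decide
    have hl : pvLabels.getD "oecd" []
        = ["institutional_control", "adoption_diffusion", "socioeconomic_control", "tech_infrastructure_control"] := by decide
    simp only [block_for_py, block_for_py_alt, hc, hr, hl, List.foldl_append, pvFoldGroup,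
      String.reduceEq, reduceIte, List.length_cons, List.length_nil]
    by_cases a0 : (pvO0.any fun k => PySem.Str.isIn k (PySem.Str.lower (v ++ " " ++ t))) = true
    · simp_all [pvO0, pvO1, pvO2]
    · by_cases a1 : (pvO1.any fun k => PySem.Str.isIn k (PySem.Str.lower (v ++ " " ++ t))) = true
      · simp_all [pvO0, pvO1, pvO2]
      · by_cases a2 : (pvO2.any fun k => PySem.Str.isIn k (PySem.Str.lower (v ++ " " ++ t))) = true
        · simp_all [pvO0, pvO1, pvO2]
        · simp_all [pvO0, pvO1, pvO2]
  by_cases h8 : s = "wb"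
  · subst h8
    have hc : pvConst.get? "wb" = none := by decide
    have hr : pvRank.get? "wb"
        = some (pvB0.map (fun k => (k, 0)) ++ pvB1.map (fun k => (k, 1))) := by decide
    have hl : pvLabels.getD "wb" []
        = ["institutional_control", "tech_infrastructure_control", "socioeconomic_control"] := by decide
    simp only [block_for_py, block_for_py_alt, hc, hr, hl, List.foldl_append, pvFoldGroup,
      String.reduceEq, reduceIte, List.length_cons, List.length_nil]
    by_cases a0 : (pvB0.any fun k => PySem.Str.isIn k (PySem.Str.lower (v ++ " " ++ t))) = true
    · simp_all [pvB0, pvB1]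
    · by_cases a1 : (pvB1.any fun k => PySem.Str.isIn k (PySem.Str.lower (v ++ " " ++ t))) = true
      · simp_all [pvB0, pvB1]
      · simp_all [pvB0, pvB1]
  · simp only [block_for_py, block_for_py_alt,
      pvConst_other s h1 h2 h3, pvRank_other s h4 h5 h6 h7 h8,
      if_neg h1, if_neg h2, if_neg h3, if_neg h4, if_neg h5, if_neg h6, if_neg h7, if_neg h8]
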